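-- pv_equiv track=rewrite | github.com/conda/conda-build | conda_build/dll.py | categorize_dependencies
-- ===== SOURCE A (Python) =====
-- def categorize_dependencies(deps, build_root):
--     inside = set()
--     outside = set()
--     missing = set()
--
--     for (depname, target) in deps:
--         if not target:
--             missing.add(depname)
--         elif target.startswith(build_root):
--             inside.add(depname)
--         else:
--             outside.add(depname)
--
--     return (inside, outside, missing)
-- ===== SOURCE B (Python) =====
-- def categorize_dependencies(deps, build_root):
--     missing = {d for (d, t) in deps if not t}
--     inside = {d for (d, t) in deps if t and t.startswith(build_root)}
--     outside = {d for (d, t) in deps if t and not t.startswith(build_root)}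
--     return (inside, outside, missing)
-- ===== Notes on version B (the rewrite author's own statement) =====
-- stated objective: simpler
-- what changed: Replaces the single branching loop that mutates three sets with three independent set comprehensions, one per category.
import Mathlib
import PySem

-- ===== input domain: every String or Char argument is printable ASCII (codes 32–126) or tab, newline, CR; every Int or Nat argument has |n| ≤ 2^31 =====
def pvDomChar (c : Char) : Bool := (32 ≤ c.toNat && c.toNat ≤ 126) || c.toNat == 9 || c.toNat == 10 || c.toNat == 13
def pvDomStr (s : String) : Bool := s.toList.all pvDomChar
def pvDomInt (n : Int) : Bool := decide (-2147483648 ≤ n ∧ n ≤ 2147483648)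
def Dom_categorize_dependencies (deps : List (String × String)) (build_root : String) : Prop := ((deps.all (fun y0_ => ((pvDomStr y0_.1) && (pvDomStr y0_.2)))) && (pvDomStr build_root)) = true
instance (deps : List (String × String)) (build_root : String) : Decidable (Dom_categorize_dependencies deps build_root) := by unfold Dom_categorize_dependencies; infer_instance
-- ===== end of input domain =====

-- B replaces A's single branching loop over three mutable sets with three
-- independent set comprehensions, one per category (objective: simpler).

-- ===== PORT A =====
-- A's loop body: classify one (depname, target) pair into the three sets.
def catStep (build_root : String)
    (st : PySem.Set String × PySem.Set String × PySem.Set String)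
    (dt : String × String) : PySem.Set String × PySem.Set String × PySem.Set String :=
  let (inside, outside, missing) := st
  let (depname, target) := dt
  if target = "" then (inside, outside, PySem.Set.add missing depname)
  else if PySem.Str.startswith target build_root then (PySem.Set.add inside depname, outside, missing)
  else (inside, PySem.Set.add outside depname, missing)

-- A's loop: one pass over deps, adding each depname to one of the three sets.
def categorize_dependencies (deps : List (String × String)) (build_root : String) : List String × List String × List String :=
  let fin := deps.foldl (catStep build_root) (PySem.Set.empty, PySem.Set.empty, PySem.Set.empty)
  (fin.1, fin.2.1, fin.2.2)

-- ===== PORT B =====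
-- B's three set comprehensions, each a filterMap over deps made into a set.
def categorize_dependencies_alt (deps : List (String × String)) (build_root : String) : List String × List String × List String :=
  let missing : PySem.Set String :=
    PySem.Set.ofList (deps.filterMap (fun dt => if dt.2 = "" then some dt.1 else none))
  let inside : PySem.Set String :=
    PySem.Set.ofList (deps.filterMap (fun dt => if dt.2 ≠ "" ∧ PySem.Str.startswith dt.2 build_root then some dt.1 else none))
  let outside : PySem.Set String :=
    PySem.Set.ofList (deps.filterMap (fun dt => if dt.2 ≠ "" ∧ ¬ PySem.Str.startswith dt.2 build_root then some dt.1 else none))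
  (inside, outside, missing)

-- ===== PRECONDITION & SPEC =====
def Spec_categorize_dependencies (deps : List (String × String)) (build_root : String) (out : List String × List String × List String) : Prop := out = categorize_dependencies_alt deps build_root
instance (deps : List (String × String)) (build_root : String) (out : List String × List String × List String) : Decidable (Spec_categorize_dependencies deps build_root out) := by unfold Spec_categorize_dependencies; infer_instance

-- ===== CLAIM (what is proved, stated in full; the proofs are below) =====
def Claim_equal_categorize_dependencies : Prop := ∀ (deps : List (String × String)) (build_root : String), Dom_categorize_dependencies deps build_root → Spec_categorize_dependencies deps build_root (categorize_dependencies deps build_root)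

-- ===== LEMMAS AND PROOFS =====

-- Reductions of A's loop body, one per branch.
theorem catStep_missing (br : String) (i o m : PySem.Set String) (d t : String)
    (ht : t = "") : catStep br (i, o, m) (d, t) = (i, o, PySem.Set.add m d) := by
  simp [catStep, ht]

theorem catStep_inside (br : String) (i o m : PySem.Set String) (d t : String)
    (ht : ¬ t = "") (hs : PySem.Str.startswith t br = true) :
    catStep br (i, o, m) (d, t) = (PySem.Set.add i d, o, m) := by
  simp only [PySem.Str.startswith_eq] at hs
  simp [catStep, ht, hs]

theorem catStep_outside (br : String) (i o m : PySem.Set String) (d t : String)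
    (ht : ¬ t = "") (hs : ¬ PySem.Str.startswith t br = true) :
    catStep br (i, o, m) (d, t) = (i, PySem.Set.add o d, m) := by
  simp only [PySem.Str.startswith_eq] at hs
  simp [catStep, ht, hs]

-- Invariant of A's loop: each component of the triple folds independently as
-- 'Set.add' over the correspondingly filtered sub-list.
theorem categorize_loop_eq (build_root : String) (deps : List (String × String))
    (i o m : PySem.Set String) :
    deps.foldl (catStep build_root) (i, o, m)
    = ((deps.filterMap (fun dt => if dt.2 ≠ "" ∧ PySem.Str.startswith dt.2 build_root then some dt.1 else none)).foldl PySem.Set.add i,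
       (deps.filterMap (fun dt => if dt.2 ≠ "" ∧ ¬ PySem.Str.startswith dt.2 build_root then some dt.1 else none)).foldl PySem.Set.add o,
       (deps.filterMap (fun dt => if dt.2 = "" then some dt.1 else none)).foldl PySem.Set.add m) := by
  induction deps generalizing i o m with
  | nil => rfl
  | cons hd tl ih =>
    obtain ⟨d, t⟩ := hd
    rw [List.foldl_cons, List.filterMap_cons, List.filterMap_cons, List.filterMap_cons]
    by_cases ht : t = ""
    · rw [catStep_missing build_root i o m d t ht, ih,
        if_neg (fun h => h.1 ht), if_neg (fun h => h.1 ht), if_pos ht, List.foldl_cons]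
    · by_cases hs : PySem.Str.startswith t build_root = true
      · rw [catStep_inside build_root i o m d t ht hs, ih,
          if_pos ⟨ht, hs⟩, if_neg (fun h => h.2 hs), if_neg ht, List.foldl_cons]
      · rw [catStep_outside build_root i o m d t ht hs, ih,
          if_neg (fun h => hs h.2), if_pos ⟨ht, hs⟩, if_neg ht, List.foldl_cons]

-- ===== VERDICT (by name: the statement is the Claim_ definition above) =====
theorem categorize_dependencies_spec : Claim_equal_categorize_dependencies := by
  intro deps build_root _
  unfold Spec_categorize_dependencies categorize_dependencies categorize_dependencies_alt
  simp only [categorize_loop_eq, PySem.Set.ofList_eq_foldl, PySem.Set.empty]
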